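-- pv_equiv track=rewrite | github.com/Rucha2424/lovlace-hackathon | backend/data_processor.py | build_topology_graph
-- ===== SOURCE A (Python) =====
-- from typing import Any
--
-- def build_topology_graph(cell_to_link: dict[int, int], cell_ids: list[int]) -> dict[str, Any]:
--     """Build DU -> Link -> RU -> Cell hierarchy for frontend graph."""
--     links: dict[int, list[int]] = {}
--     for cid, lid in cell_to_link.items():
--         links.setdefault(lid, []).append(cid)
--     nodes = [
--         {"id": "DU", "type": "du", "label": "DU"},
--     ]
--     edges = []
--     for lid in sorted(links.keys()):
--         node_id = f"Link_{lid+1}"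
--         nodes.append({"id": node_id, "type": "link", "label": f"Link {lid+1}"})
--         edges.append({"source": "DU", "target": node_id})
--         ru_id = f"RU_{lid+1}"
--         nodes.append({"id": ru_id, "type": "ru", "label": f"RU {lid+1}"})
--         edges.append({"source": node_id, "target": ru_id})
--         for cid in sorted(links[lid]):
--             cell_node = f"Cell_{cid}"
--             nodes.append({"id": cell_node, "type": "cell", "label": f"Cell {cid}"})
--             edges.append({"source": ru_id, "target": cell_node})
--     return {"nodes": nodes, "edges": edges}
-- ===== SOURCE B (Python) =====
-- from itertools import groupby
--
-- def build_topology_graph(cell_to_link: dict[int, int], cell_ids: list[int]):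
--     """Build DU -> Link -> RU -> Cell hierarchy for frontend graph.
--
--     One composite-key sort + groupby sweep instead of an intermediate
--     lid -> [cid] grouping dict with per-link sorts."""
--     nodes = [{"id": "DU", "type": "du", "label": "DU"}]
--     edges = []
--     pairs = sorted(cell_to_link.items(), key=lambda p: (p[1], p[0]))
--     for lid, grp in groupby(pairs, key=lambda p: p[1]):
--         link_id = f"Link_{lid+1}"
--         nodes.append({"id": link_id, "type": "link", "label": f"Link {lid+1}"})
--         edges.append({"source": "DU", "target": link_id})
--         ru_id = f"RU_{lid+1}"
--         nodes.append({"id": ru_id, "type": "ru", "label": f"RU {lid+1}"})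
--         edges.append({"source": link_id, "target": ru_id})
--         for cid, _ in grp:
--             nodes.append({"id": f"Cell_{cid}", "type": "cell", "label": f"Cell {cid}"})
--             edges.append({"source": ru_id, "target": f"Cell_{cid}"})
--     return {"nodes": nodes, "edges": edges}
-- ===== Notes on version B (the rewrite author's own statement) =====
-- stated objective: alternative
-- what changed: B drops A's intermediate lid->[cid] grouping dict and its per-link sorts: it sorts the dict items once by the composite key (lid, cid) and emits Link/RU headers and Cell entries in a single groupby sweep over the sorted pairs.
import Mathlib
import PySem

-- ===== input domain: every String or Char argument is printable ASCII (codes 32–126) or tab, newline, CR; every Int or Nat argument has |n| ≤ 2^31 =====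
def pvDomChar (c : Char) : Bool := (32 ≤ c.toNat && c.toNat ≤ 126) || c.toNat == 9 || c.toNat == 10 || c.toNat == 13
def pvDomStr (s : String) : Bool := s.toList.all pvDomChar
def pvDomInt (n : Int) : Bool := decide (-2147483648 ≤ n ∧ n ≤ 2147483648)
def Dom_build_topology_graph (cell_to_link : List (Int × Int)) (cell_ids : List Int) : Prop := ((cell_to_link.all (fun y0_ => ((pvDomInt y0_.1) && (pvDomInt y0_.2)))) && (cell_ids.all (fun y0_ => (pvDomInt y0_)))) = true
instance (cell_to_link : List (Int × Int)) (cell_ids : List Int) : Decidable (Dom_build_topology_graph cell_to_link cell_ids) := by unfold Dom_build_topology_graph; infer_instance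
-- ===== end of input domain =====

-- B replaces A's intermediate lid->[cid] grouping dict and per-link sorts by one composite-key
-- sort of the dict items plus a groupby sweep (objective: alternative decomposition, same cost).

-- ===== PORT A =====
def build_topology_graph (cell_to_link : List (Int × Int)) (cell_ids : List Int) : List (String × List (List (String × String))) :=
  -- the dict argument, exactly as Python receives it (insertion order, last duplicate key wins)
  let items := (PySem.Dict.ofList cell_to_link).items
  -- links.setdefault(lid, []).append(cid)
  let links := items.foldl (fun L p => L.modify p.2 [] (fun l => l ++ [p.1])) PySem.Dict.empty
  let res := (PySem.List.sorted links.keys (fun x => x) false).foldl (fun acc lid =>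
    let node_id := "Link_" ++ PySem.Int.toStr (lid + 1)
    let nodes1 := acc.1 ++ [[("id", node_id), ("type", "link"), ("label", "Link " ++ PySem.Int.toStr (lid + 1))]]
    let edges1 := acc.2 ++ [[("source", "DU"), ("target", node_id)]]
    let ru_id := "RU_" ++ PySem.Int.toStr (lid + 1)
    let nodes2 := nodes1 ++ [[("id", ru_id), ("type", "ru"), ("label", "RU " ++ PySem.Int.toStr (lid + 1))]]
    let edges2 := edges1 ++ [[("source", node_id), ("target", ru_id)]]
    (PySem.List.sorted (links.getD lid []) (fun x => x) false).foldl (fun acc2 cid =>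
      (acc2.1 ++ [[("id", "Cell_" ++ PySem.Int.toStr cid), ("type", "cell"), ("label", "Cell " ++ PySem.Int.toStr cid)]],
       acc2.2 ++ [[("source", ru_id), ("target", "Cell_" ++ PySem.Int.toStr cid)]])) (nodes2, edges2))
    ([[("id", "DU"), ("type", "du"), ("label", "DU")]], ([] : List (List (String × String))))
  [("nodes", res.1), ("edges", res.2)]

-- ===== PORT B =====
-- manual port of itertools.groupby over the sorted pairs: 'cur' is the current group key;
-- a Link/RU header is emitted exactly when the link id changes
def altLoop : List (Int × Int) → Option Int → List (List (String × String)) → List (List (String × String)) → List (List (String × String)) × List (List (String × String))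
  | [], _, nodes, edges => (nodes, edges)
  | (cid, lid) :: rest, cur, nodes, edges =>
    if cur = some lid then
      altLoop rest cur
        (nodes ++ [[("id", "Cell_" ++ PySem.Int.toStr cid), ("type", "cell"), ("label", "Cell " ++ PySem.Int.toStr cid)]])
        (edges ++ [[("source", "RU_" ++ PySem.Int.toStr (lid + 1)), ("target", "Cell_" ++ PySem.Int.toStr cid)]])
    else
      altLoop rest (some lid)
        (nodes ++ [[("id", "Link_" ++ PySem.Int.toStr (lid + 1)), ("type", "link"), ("label", "Link " ++ PySem.Int.toStr (lid + 1))],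
                   [("id", "RU_" ++ PySem.Int.toStr (lid + 1)), ("type", "ru"), ("label", "RU " ++ PySem.Int.toStr (lid + 1))],
                   [("id", "Cell_" ++ PySem.Int.toStr cid), ("type", "cell"), ("label", "Cell " ++ PySem.Int.toStr cid)]])
        (edges ++ [[("source", "DU"), ("target", "Link_" ++ PySem.Int.toStr (lid + 1))],
                   [("source", "Link_" ++ PySem.Int.toStr (lid + 1)), ("target", "RU_" ++ PySem.Int.toStr (lid + 1))],
                   [("source", "RU_" ++ PySem.Int.toStr (lid + 1)), ("target", "Cell_" ++ PySem.Int.toStr cid)]])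

def build_topology_graph_alt (cell_to_link : List (Int × Int)) (cell_ids : List Int) : List (String × List (List (String × String))) :=
  -- pairs = sorted(cell_to_link.items(), key=lambda p: (p[1], p[0]))
  let pairs := PySem.List.sorted2 (PySem.Dict.ofList cell_to_link).items (fun p => p.2) (fun p => p.1) false
  let res := altLoop pairs none [[("id", "DU"), ("type", "du"), ("label", "DU")]] []
  [("nodes", res.1), ("edges", res.2)]

-- ===== PRECONDITION & SPEC =====
def Spec_build_topology_graph (cell_to_link : List (Int × Int)) (cell_ids : List Int) (out : List (String × List (List (String × String)))) : Prop := out = build_topology_graph_alt cell_to_link cell_ids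
instance (cell_to_link : List (Int × Int)) (cell_ids : List Int) (out : List (String × List (List (String × String)))) : Decidable (Spec_build_topology_graph cell_to_link cell_ids out) := by unfold Spec_build_topology_graph; infer_instance

-- ===== CLAIM (what is proved, stated in full; the proofs are below) =====
def Claim_equal_build_topology_graph : Prop := ∀ (cell_to_link : List (Int × Int)) (cell_ids : List Int), Dom_build_topology_graph cell_to_link cell_ids → Spec_build_topology_graph cell_to_link cell_ids (build_topology_graph cell_to_link cell_ids)

-- ===== LEMMAS AND PROOFS =====

-- shared vocabulary for the proofs (not used by the ports)
def duNode : List (String × String) := [("id", "DU"), ("type", "du"), ("label", "DU")]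
def linkStr (lid : Int) : String := "Link_" ++ PySem.Int.toStr (lid + 1)
def ruStr (lid : Int) : String := "RU_" ++ PySem.Int.toStr (lid + 1)
def linkNode (lid : Int) : List (String × String) := [("id", linkStr lid), ("type", "link"), ("label", "Link " ++ PySem.Int.toStr (lid + 1))]
def ruNode (lid : Int) : List (String × String) := [("id", ruStr lid), ("type", "ru"), ("label", "RU " ++ PySem.Int.toStr (lid + 1))]
def cellNode (cid : Int) : List (String × String) := [("id", "Cell_" ++ PySem.Int.toStr cid), ("type", "cell"), ("label", "Cell " ++ PySem.Int.toStr cid)]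
def duEdge (lid : Int) : List (String × String) := [("source", "DU"), ("target", linkStr lid)]
def ruEdge (lid : Int) : List (String × String) := [("source", linkStr lid), ("target", ruStr lid)]
def cellEdge (lid cid : Int) : List (String × String) := [("source", ruStr lid), ("target", "Cell_" ++ PySem.Int.toStr cid)]

def pvItems (m : List (Int × Int)) : List (Int × Int) := (PySem.Dict.ofList m).items
def pvC (m : List (Int × Int)) (lid : Int) : List Int :=
  PySem.List.sorted (((pvItems m).filter (fun p => p.2 == lid)).map (fun p => p.1)) (fun x => x) false
def pvL (m : List (Int × Int)) : List Int :=
  PySem.List.sorted (PySem.Set.ofList ((pvItems m).map (fun p => p.2))) (fun x => x) false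
def nodesOf (m : List (Int × Int)) (lid : Int) : List (List (String × String)) :=
  [linkNode lid, ruNode lid] ++ (pvC m lid).map cellNode
def edgesOf (m : List (Int × Int)) (lid : Int) : List (List (String × String)) :=
  [duEdge lid, ruEdge lid] ++ (pvC m lid).map (cellEdge lid)
def pvG (m : List (Int × Int)) : List (Int × Int) :=
  (pvL m).flatMap (fun lid => (pvC m lid).map (fun c => (c, lid)))

def lexle (a b : Int × Int) : Prop := a.2 < b.2 ∨ (a.2 = b.2 ∧ a.1 ≤ b.1)
def strictlex (a b : Int × Int) : Prop := a.2 < b.2 ∨ (a.2 = b.2 ∧ a.1 < b.1)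

-- ---- generic list facts ----
theorem insertBy_perm {α : Type} (bf : α → α → Bool) (x : α) : ∀ (ys : List α), (PySem.List.insertBy bf x ys).Perm (x :: ys) := by
  intro ys
  induction ys with
  | nil => simp [PySem.List.insertBy]
  | cons y ys ih =>
    simp only [PySem.List.insertBy]
    split
    · exact List.Perm.refl _
    · exact (ih.cons y).trans (List.Perm.swap x y ys)

theorem lexle_trans {a b c : Int × Int} (h1 : lexle a b) (h2 : lexle b c) : lexle a c := by
  unfold lexle at *; omega

theorem insertBy_lexle (x : Int × Int) (ys : List (Int × Int))
    (h : ys.Pairwise lexle) :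
    (PySem.List.insertBy (fun a b => decide (a.2 < b.2) || (!decide (b.2 < a.2) && decide (a.1 < b.1))) x ys).Pairwise lexle := by
  induction ys with
  | nil => simp [PySem.List.insertBy]
  | cons y ys ih =>
    rcases List.pairwise_cons.mp h with ⟨hy, hys⟩
    simp only [PySem.List.insertBy]
    split
    · rename_i hb
      have hxy : lexle x y := by
        simp only [Bool.or_eq_true, Bool.and_eq_true, Bool.not_eq_true', decide_eq_true_eq, decide_eq_false_iff_not] at hb
        unfold lexle; omega
      refine List.pairwise_cons.mpr ⟨?_, h⟩
      intro z hz
      rcases hz with _ | hz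
      · exact hxy
      · exact lexle_trans hxy (hy _ (by assumption))
    · rename_i hb
      have hyx : lexle y x := by
        simp only [Bool.or_eq_true, Bool.and_eq_true, Bool.not_eq_true', decide_eq_true_eq, decide_eq_false_iff_not] at hb
        push Not at hb
        unfold lexle; omega
      refine List.pairwise_cons.mpr ⟨?_, ih hys⟩
      intro z hz
      rcases List.mem_cons.mp ((insertBy_perm _ x ys).mem_iff.mp hz) with rfl | hz'
      · exact hyx
      · exact hy _ hz'

theorem sorted2_eq_of_perm_of_pairwise (xs ys : List (Int × Int))
    (hperm : ys.Perm xs) (hpw : ys.Pairwise strictlex) :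
    PySem.List.sorted2 xs (fun p => p.2) (fun p => p.1) false = ys := by
  have hsorted : ∀ (l : List (Int × Int)) (acc : List (Int × Int)), acc.Pairwise lexle →
      (l.foldl (fun acc x => PySem.List.insertBy (fun a b => decide (a.2 < b.2) || (!decide (b.2 < a.2) && decide (a.1 < b.1))) x acc) acc).Pairwise lexle := by
    intro l
    induction l with
    | nil => intro acc h; exact h
    | cons z l ih =>
      intro acc h
      exact ih _ (insertBy_lexle z acc h)
  have h1 : (PySem.List.sorted2 xs (fun p => p.2) (fun p => p.1) false).Pairwise lexle := by
    have := hsorted xs [] (List.Pairwise.nil)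
    simpa [PySem.List.sorted2] using this
  have h2 : ys.Pairwise lexle := hpw.imp (by intro a b h; unfold strictlex at h; unfold lexle; omega)
  have hp : (PySem.List.sorted2 xs (fun p => p.2) (fun p => p.1) false).Perm ys :=
    (PySem.List.sorted2_perm xs _ _ false).trans hperm.symm
  exact List.eq_of_perm_of_sorted (fun a b _ _ hab hba => by
    unfold lexle at hab hba
    have : a.2 = b.2 ∧ a.1 = b.1 := by omega
    exact Prod.ext this.2 this.1) h1 h2 hp

theorem flatMap_perm_congr {α β : Type} (L : List α) (f g : α → List β)
    (h : ∀ a ∈ L, (f a).Perm (g a)) : (L.flatMap f).Perm (L.flatMap g) := by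
  induction L with
  | nil => simp
  | cons a L ih =>
    simp only [List.flatMap_cons]
    exact (h a (by simp)).append (ih (fun b hb => h b (by simp [hb])))

theorem partition_perm : ∀ (L : List Int) (its : List (Int × Int)), L.Nodup →
    (∀ p ∈ its, p.2 ∈ L) → (L.flatMap (fun lid => its.filter (fun p => p.2 == lid))).Perm its := by
  intro L
  induction L with
  | nil =>
    intro its _ hcov
    cases its with
    | nil => simp
    | cons p ps => exact absurd (hcov p (by simp)) (by simp)
  | cons lid L ih =>
    intro its hnd hcov
    simp only [List.flatMap_cons]
    have hset : ∀ lid' ∈ L, its.filter (fun p => p.2 == lid')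
        = (its.filter (fun p => !(p.2 == lid))).filter (fun p => p.2 == lid') := by
      intro lid' hl'
      have hne : lid' ≠ lid := by
        rintro rfl; exact (List.nodup_cons.mp hnd).1 hl'
      rw [List.filter_filter]
      apply List.filter_congr
      intro p _
      by_cases h : p.2 = lid'
      · simp [h, hne]
      · simp [h]
    have hrest : (L.flatMap (fun lid' => its.filter (fun p => p.2 == lid'))).Perm
        (its.filter (fun p => !(p.2 == lid))) := by
      have := ih (its.filter (fun p => !(p.2 == lid))) (List.nodup_cons.mp hnd).2 ?_
      · refine List.Perm.trans (flatMap_perm_congr L _ _ ?_) this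
        intro a ha
        rw [hset a ha]
      · intro p hp
        have hmem := List.mem_of_mem_filter hp
        have h2 := hcov p hmem
        have h3 : ¬(p.2 = lid) := by
          have := List.of_mem_filter hp
          simpa using this
        simpa [h3] using h2
    exact (hrest.append_left _).trans (List.filter_append_perm _ its)

-- ---- facts about the shared decomposition ----
theorem pvC_perm (m : List (Int × Int)) (lid : Int) :
    ((pvC m lid).map (fun c => (c, lid))).Perm ((pvItems m).filter (fun p => p.2 == lid)) := by
  have h1 : (pvC m lid).Perm (((pvItems m).filter (fun p => p.2 == lid)).map (fun p => p.1)) :=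
    PySem.List.sorted_perm _ _ _
  refine (h1.map (fun c => (c, lid))).trans (List.Perm.of_eq ?_)
  rw [List.map_map]
  have h2 : ∀ p ∈ (pvItems m).filter (fun p => p.2 == lid), ((fun c => (c, lid)) ∘ fun p => p.1) p = id p := by
    intro p hp
    have h3 : p.2 = lid := by simpa using List.of_mem_filter hp
    simp only [Function.comp, id]
    exact Prod.ext rfl h3.symm
  rw [List.map_congr_left h2, List.map_id]

theorem pvItems_fst_nodup (m : List (Int × Int)) : ((pvItems m).map (fun p => p.1)).Nodup := by
  have := PySem.Dict.nodup_keys_ofList (ps := m)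
  simpa [PySem.Dict.keys, pvItems] using this

theorem pvC_nodup (m : List (Int × Int)) (lid : Int) : (pvC m lid).Nodup := by
  have hsub : (((pvItems m).filter (fun p => p.2 == lid)).map (fun p => p.1)).Sublist ((pvItems m).map (fun p => p.1)) :=
    List.Sublist.map _ List.filter_sublist
  have hnd := hsub.nodup (pvItems_fst_nodup m)
  exact ((PySem.List.sorted_perm _ _ _).nodup_iff).mpr hnd

theorem pvC_pairwise (m : List (Int × Int)) (lid : Int) : (pvC m lid).Pairwise (· < ·) := by
  have h1 : (pvC m lid).Pairwise (fun a b => a ≤ b) := PySem.List.sorted_pairwise _ _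
  have h2 : (pvC m lid).Pairwise (fun a b => a ≠ b) := pvC_nodup m lid
  exact (h1.and h2).imp (by rintro a b ⟨hle, hne⟩; omega)

theorem pvL_pairwise (m : List (Int × Int)) : (pvL m).Pairwise (· < ·) :=
  PySem.List.sorted_ofList_pairwise_lt _

theorem pvL_nodup (m : List (Int × Int)) : (pvL m).Nodup :=
  ((PySem.List.sorted_perm _ _ _).nodup_iff).mpr (PySem.Set.nodup_ofList _)

theorem mem_pvL (m : List (Int × Int)) (lid : Int) : lid ∈ pvL m ↔ lid ∈ (pvItems m).map (fun p => p.2) := by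
  rw [pvL, PySem.List.mem_sorted, PySem.Set.mem_ofList]

theorem pvC_ne_nil (m : List (Int × Int)) (lid : Int) (h : lid ∈ pvL m) : pvC m lid ≠ [] := by
  rw [mem_pvL] at h
  obtain ⟨p, hp, hp2⟩ := List.mem_map.mp h
  intro hnil
  rw [pvC, PySem.List.sorted_eq_nil_iff] at hnil
  have : p ∈ (pvItems m).filter (fun q => q.2 == lid) := List.mem_filter.mpr ⟨hp, by simp [hp2]⟩
  simpa [hnil] using List.mem_map_of_mem (f := fun p => p.1) this

theorem pvG_perm (m : List (Int × Int)) : (pvG m).Perm (pvItems m) := by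
  refine (flatMap_perm_congr (pvL m) _ (fun lid => (pvItems m).filter (fun p => p.2 == lid))
    (fun lid _ => pvC_perm m lid)).trans ?_
  exact partition_perm (pvL m) (pvItems m) (pvL_nodup m)
    (fun p hp => (mem_pvL m p.2).mpr (List.mem_map_of_mem hp))

theorem pvG_pairwise (m : List (Int × Int)) : (pvG m).Pairwise strictlex := by
  rw [pvG, List.flatMap_def, List.pairwise_flatten]
  constructor
  · intro l hl
    obtain ⟨lid, _, rfl⟩ := List.mem_map.mp hl
    rw [List.pairwise_map]
    exact (pvC_pairwise m lid).imp (by intro a b h; right; exact ⟨rfl, h⟩)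
  · rw [List.pairwise_map]
    refine (pvL_pairwise m).imp ?_
    intro a b hab x hx y hy
    obtain ⟨c, _, rfl⟩ := List.mem_map.mp hx
    obtain ⟨c', _, rfl⟩ := List.mem_map.mp hy
    left; exact hab

-- ---- A-side ----
theorem pvLinks_getD (m : List (Int × Int)) (lid : Int) :
    (((pvItems m).foldl (fun L p => L.modify p.2 [] (fun l => l ++ [p.1])) PySem.Dict.empty).getD lid [])
      = ((pvItems m).filter (fun p => p.2 == lid)).map (fun p => p.1) := by
  have hswap : (pvItems m).foldl (fun L p => L.modify p.2 [] (fun l => l ++ [p.1])) PySem.Dict.empty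
      = ((pvItems m).map Prod.swap).foldl (fun L q => L.modify q.1 [] (fun l => l ++ [q.2])) PySem.Dict.empty := by
    rw [List.foldl_map]; rfl
  rw [hswap, PySem.Dict.getD_foldl_modify_append]
  simp only [PySem.Dict.getD_empty]
  rw [List.filter_map, List.map_map]
  simp only [List.nil_append]
  rfl

theorem pvLinks_keys (m : List (Int × Int)) :
    ((pvItems m).foldl (fun L p => L.modify p.2 [] (fun l => l ++ [p.1])) PySem.Dict.empty).keys
      = PySem.Set.ofList ((pvItems m).map (fun p => p.2)) := by
  have := PySem.Dict.keys_foldl_modify_key (pvItems m) (fun p => p.2) ([] : List Int)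
    (fun _ p => (fun l => l ++ [p.1])) PySem.Dict.empty
  simpa [PySem.Dict.keys_empty, PySem.Set.update_nil_left] using this

theorem innerA (ru : String) : ∀ (cs : List Int) (ns es : List (List (String × String))),
    cs.foldl (fun acc2 cid =>
      (acc2.1 ++ [[("id", "Cell_" ++ PySem.Int.toStr cid), ("type", "cell"), ("label", "Cell " ++ PySem.Int.toStr cid)]],
       acc2.2 ++ [[("source", ru), ("target", "Cell_" ++ PySem.Int.toStr cid)]])) (ns, es)
      = (ns ++ cs.map cellNode, es ++ cs.map (fun cid => [("source", ru), ("target", "Cell_" ++ PySem.Int.toStr cid)])) := by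
  intro cs
  induction cs with
  | nil => intro ns es; simp
  | cons c cs ih =>
    intro ns es
    simp only [List.foldl_cons]
    rw [ih]
    simp [cellNode, List.append_assoc]

theorem outerA (links : PySem.Dict Int (List Int)) : ∀ (ls : List Int) (ns es : List (List (String × String))),
    ls.foldl (fun acc lid =>
      let node_id := "Link_" ++ PySem.Int.toStr (lid + 1)
      let nodes1 := acc.1 ++ [[("id", node_id), ("type", "link"), ("label", "Link " ++ PySem.Int.toStr (lid + 1))]]
      let edges1 := acc.2 ++ [[("source", "DU"), ("target", node_id)]]
      let ru_id := "RU_" ++ PySem.Int.toStr (lid + 1)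
      let nodes2 := nodes1 ++ [[("id", ru_id), ("type", "ru"), ("label", "RU " ++ PySem.Int.toStr (lid + 1))]]
      let edges2 := edges1 ++ [[("source", node_id), ("target", ru_id)]]
      (PySem.List.sorted (links.getD lid []) (fun x => x) false).foldl (fun acc2 cid =>
        (acc2.1 ++ [[("id", "Cell_" ++ PySem.Int.toStr cid), ("type", "cell"), ("label", "Cell " ++ PySem.Int.toStr cid)]],
         acc2.2 ++ [[("source", ru_id), ("target", "Cell_" ++ PySem.Int.toStr cid)]])) (nodes2, edges2)) (ns, es)
    = (ns ++ ls.flatMap (fun lid => [linkNode lid, ruNode lid] ++ (PySem.List.sorted (links.getD lid []) (fun x => x) false).map cellNode),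
       es ++ ls.flatMap (fun lid => [duEdge lid, ruEdge lid] ++ (PySem.List.sorted (links.getD lid []) (fun x => x) false).map (cellEdge lid))) := by
  intro ls
  induction ls with
  | nil => intro ns es; simp
  | cons lid ls ih =>
    intro ns es
    simp only [List.foldl_cons]
    rw [innerA ("RU_" ++ PySem.Int.toStr (lid + 1))]
    rw [ih]
    simp [linkNode, ruNode, duEdge, ruEdge, cellEdge, linkStr, ruStr, List.append_assoc]

theorem A_eq (m : List (Int × Int)) (ids : List Int) :
    build_topology_graph m ids
      = [("nodes", duNode :: (pvL m).flatMap (nodesOf m)), ("edges", (pvL m).flatMap (edgesOf m))] := by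
  show ([("nodes", _), ("edges", _)] : List (String × List (List (String × String)))) = _
  rw [outerA]
  have hC : ∀ lid : Int, PySem.List.sorted
      ((((pvItems m).foldl (fun L p => L.modify p.2 [] (fun l => l ++ [p.1])) PySem.Dict.empty)).getD lid [])
      (fun x => x) false = pvC m lid := by
    intro lid; rw [pvLinks_getD]; rfl
  simp only [pvItems] at hC
  simp only [hC]
  have hK : ((PySem.Dict.ofList m).items.foldl (fun L p => L.modify p.2 [] (fun l => l ++ [p.1])) PySem.Dict.empty).keys
      = PySem.Set.ofList ((PySem.Dict.ofList m).items.map (fun p => p.2)) := pvLinks_keys m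
  rw [hK]
  have h1 : nodesOf m = fun lid => linkNode lid :: ruNode lid :: List.map cellNode (pvC m lid) := by
    funext lid; simp [nodesOf]
  have h2 : edgesOf m = fun lid => duEdge lid :: ruEdge lid :: List.map (cellEdge lid) (pvC m lid) := by
    funext lid; simp [edgesOf]
  simp only [pvL, pvItems, duNode, h1, h2]
  simp

-- ---- B-side ----
theorem altLoop_cells (lid : Int) : ∀ (cs : List Int) (rest : List (Int × Int)) (ns es : List (List (String × String))),
    altLoop (cs.map (fun c => (c, lid)) ++ rest) (some lid) ns es
      = altLoop rest (some lid) (ns ++ cs.map cellNode) (es ++ cs.map (cellEdge lid)) := by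
  intro cs
  induction cs with
  | nil => intro rest ns es; simp
  | cons c cs ih =>
    intro rest ns es
    simp only [List.map_cons, List.cons_append, altLoop, if_pos]
    rw [ih]
    simp [cellNode, cellEdge, ruStr, List.append_assoc]

theorem altLoop_flat (m : List (Int × Int)) : ∀ (L : List Int), L.Pairwise (· < ·) →
    (∀ lid ∈ L, pvC m lid ≠ []) → ∀ (cur : Option Int), (∀ lid ∈ L, cur ≠ some lid) →
    ∀ (ns es : List (List (String × String))),
    altLoop (L.flatMap (fun lid => (pvC m lid).map (fun c => (c, lid)))) cur ns es
      = (ns ++ L.flatMap (nodesOf m), es ++ L.flatMap (edgesOf m)) := by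
  intro L
  induction L with
  | nil => intro _ _ cur _ ns es; simp [altLoop]
  | cons lid L ih =>
    intro hpw hne cur hcur ns es
    obtain ⟨c0, cs, hC⟩ : ∃ c0 cs, pvC m lid = c0 :: cs := by
      cases h : pvC m lid with
      | nil => exact absurd h (hne lid (by simp))
      | cons a b => exact ⟨a, b, rfl⟩
    simp only [List.flatMap_cons, hC, List.map_cons, List.cons_append]
    rw [show altLoop ((c0, lid) :: (cs.map (fun c => (c, lid)) ++ L.flatMap (fun l => (pvC m l).map (fun c => (c, l))))) cur ns es
        = altLoop (cs.map (fun c => (c, lid)) ++ L.flatMap (fun l => (pvC m l).map (fun c => (c, l)))) (some lid)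
            (ns ++ [[("id", "Link_" ++ PySem.Int.toStr (lid + 1)), ("type", "link"), ("label", "Link " ++ PySem.Int.toStr (lid + 1))],
                    [("id", "RU_" ++ PySem.Int.toStr (lid + 1)), ("type", "ru"), ("label", "RU " ++ PySem.Int.toStr (lid + 1))],
                    [("id", "Cell_" ++ PySem.Int.toStr c0), ("type", "cell"), ("label", "Cell " ++ PySem.Int.toStr c0)]])
            (es ++ [[("source", "DU"), ("target", "Link_" ++ PySem.Int.toStr (lid + 1))],
                    [("source", "Link_" ++ PySem.Int.toStr (lid + 1)), ("target", "RU_" ++ PySem.Int.toStr (lid + 1))],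
                    [("source", "RU_" ++ PySem.Int.toStr (lid + 1)), ("target", "Cell_" ++ PySem.Int.toStr c0)]])
        from by simp [altLoop, hcur lid (by simp)]]
    rw [altLoop_cells]
    rw [ih (List.pairwise_cons.mp hpw).2 (fun l hl => hne l (by simp [hl])) (some lid) ?_]
    · simp only [nodesOf, edgesOf, hC]
      simp [linkNode, ruNode, cellNode, duEdge, ruEdge, cellEdge, linkStr, ruStr, List.append_assoc]
    · intro l hl h
      exact absurd (Option.some.inj h) (ne_of_lt ((List.pairwise_cons.mp hpw).1 l hl))

theorem B_eq (m : List (Int × Int)) (ids : List Int) :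
    build_topology_graph_alt m ids
      = [("nodes", duNode :: (pvL m).flatMap (nodesOf m)), ("edges", (pvL m).flatMap (edgesOf m))] := by
  show ([("nodes", _), ("edges", _)] : List (String × List (List (String × String)))) = _
  rw [show PySem.List.sorted2 (PySem.Dict.ofList m).items (fun p => p.2) (fun p => p.1) false = pvG m from
    sorted2_eq_of_perm_of_pairwise _ _ (pvG_perm m) (pvG_pairwise m)]
  rw [pvG, altLoop_flat m (pvL m) (pvL_pairwise m) (fun lid h => pvC_ne_nil m lid h) none (by simp)]
  rfl

-- ===== VERDICT (by name: the statement is the Claim_ definition above) =====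
theorem build_topology_graph_spec : Claim_equal_build_topology_graph := by
  intro m ids _
  unfold Spec_build_topology_graph
  rw [A_eq, B_eq]
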